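-- pv_equiv track=rewrite | github.com/Udonburo/pale-ale | tools/realdata_label_utils.py | count_labels_records
-- ===== SOURCE A (Python) =====
-- from typing import Any, Dict, Iterable, Optional
--
-- def normalize_label(value: Any) -> Optional[int]:
--     if value is None:
--         return None
--     if isinstance(value, bool):
--         raise ValueError(f"invalid boolean label: {value!r}")
--     if isinstance(value, int) and value in (0, 1):
--         return int(value)
--     raise ValueError(f"label must be 0/1/null, got: {value!r}")
--
-- def count_labels_records(records: Iterable[Dict[str, Any]]) -> Dict[str, int]:
--     count0 = 0
--     count1 = 0
--     countnull = 0
--     total = 0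
--     for row in records:
--         total += 1
--         label = normalize_label(row.get("label"))
--         if label is None:
--             countnull += 1
--         elif label == 0:
--             count0 += 1
--         else:
--             count1 += 1
--     return {
--         "total_rows": total,
--         "count0": count0,
--         "count1": count1,
--         "countnull": countnull,
--     }
-- ===== SOURCE B (Python) =====
-- from typing import Any, Dict, Iterable, Optional
--
-- def normalize_label(value: Any) -> Optional[int]:
--     if value is None:
--         return None
--     if isinstance(value, bool):
--         raise ValueError(f"invalid boolean label: {value!r}")
--     if isinstance(value, int) and value in (0, 1):
--         return int(value)
--     raise ValueError(f"label must be 0/1/null, got: {value!r}")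
--
-- def count_labels_records(records: Iterable[Dict[str, Any]]) -> Dict[str, int]:
--     # Stage 1: validate/normalize all labels in order (first bad label raises).
--     labels = [normalize_label(row.get("label")) for row in records]
--     # Stage 2: staged counting passes; countnull is derived arithmetically,
--     # since every surviving label is 0, 1 or None.
--     total = len(labels)
--     count0 = labels.count(0)
--     count1 = labels.count(1)
--     return {
--         "total_rows": total,
--         "count0": count0,
--         "count1": count1,
--         "countnull": total - count0 - count1,
--     }
-- ===== Notes on version B (the rewrite author's own statement) =====
-- stated objective: alternative
-- what changed: Replaces A's single validating pass with four scalar accumulators and per-row if/elif/else by a staged design: first materialize the normalized label list, then take len() and two list.count() passes, deriving countnull arithmetically as total - count0 - count1 instead of counting it.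
import Mathlib
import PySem

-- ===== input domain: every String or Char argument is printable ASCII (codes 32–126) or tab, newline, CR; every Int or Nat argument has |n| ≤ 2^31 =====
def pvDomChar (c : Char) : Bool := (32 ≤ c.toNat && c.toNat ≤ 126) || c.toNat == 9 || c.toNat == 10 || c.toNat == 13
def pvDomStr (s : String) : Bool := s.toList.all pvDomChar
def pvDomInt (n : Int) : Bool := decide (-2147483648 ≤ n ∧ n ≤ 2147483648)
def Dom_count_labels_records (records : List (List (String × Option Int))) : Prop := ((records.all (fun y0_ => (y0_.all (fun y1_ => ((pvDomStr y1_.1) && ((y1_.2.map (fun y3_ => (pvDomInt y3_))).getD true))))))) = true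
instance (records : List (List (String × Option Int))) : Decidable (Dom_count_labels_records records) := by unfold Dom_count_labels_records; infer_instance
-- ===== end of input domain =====

-- B validates/materializes the label list first, then counts by staged passes (len, count(0),
-- count(1)) and derives countnull arithmetically, instead of A's single branching loop with
-- four scalar accumulators (objective: alternative).


-- ===== PORT A =====
-- shared module helper normalize_label: `some l` = normalized label, `none` = ValueError
def normalizeLabel (v : Option Int) : Option (Option Int) :=
  match v with
  | none => some none
  | some n => if n == 0 || n == 1 then some (some n) else none

-- the row's row.get("label") (None when the key is absent)
def rowLabel (row : List (String × Option Int)) : Option Int :=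
  PySem.Dict.getD (PySem.Dict.mk row) "label" none

-- A's for-loop with its four scalar accumulators; `none` = ValueError
def countLoop : List (List (String × Option Int)) → Int → Int → Int → Int → Option (Int × Int × Int × Int)
  | [], total, c0, c1, cn => some (total, c0, c1, cn)
  | row :: rest, total, c0, c1, cn =>
    match normalizeLabel (rowLabel row) with
    | none => none
    | some none => countLoop rest (total + 1) c0 c1 (cn + 1)
    | some (some l) =>
      if l == 0 then countLoop rest (total + 1) (c0 + 1) c1 cn
      else countLoop rest (total + 1) c0 (c1 + 1) cn

def count_labels_records (records : List (List (String × Option Int))) : List (String × Int) :=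
  match countLoop records 0 0 0 0 with
  | none => []   -- ValueError; excluded by Pre_
  | some (total, c0, c1, cn) =>
      [("total_rows", total), ("count0", c0), ("count1", c1), ("countnull", cn)]

-- ===== PORT B =====
-- stage 1: the list comprehension [normalize_label(row.get("label")) for row in records]; `none` = ValueError
def normalizedLabels : List (List (String × Option Int)) → Option (List (Option Int))
  | [] => some []
  | row :: rest =>
    match normalizeLabel (rowLabel row) with
    | none => none
    | some l => (normalizedLabels rest).map (l :: ·)

def count_labels_records_alt (records : List (List (String × Option Int))) : List (String × Int) :=
  match normalizedLabels records with
  | none => []   -- ValueError; excluded by Pre_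
  | some labels =>
    let total : Int := labels.length
    let c0 : Int := PySem.List.count labels (some 0)
    let c1 : Int := PySem.List.count labels (some 1)
    [("total_rows", total), ("count0", c0), ("count1", c1), ("countnull", total - c0 - c1)]

-- ===== PRECONDITION & SPEC =====
-- Pre_ excludes records whose "label" value is other than None/0/1: there normalize_label raises ValueError in both programs.
def Pre_count_labels_records (records : List (List (String × Option Int))) : Prop :=
  ∀ row ∈ records, rowLabel row = none ∨ rowLabel row = some 0 ∨ rowLabel row = some 1
instance (records : List (List (String × Option Int))) : Decidable (Pre_count_labels_records records) := by unfold Pre_count_labels_records; infer_instance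

def pvWitness_count_labels_records : (List (List (String × Option Int))) :=
  [[("label", some 0)], [("label", none)], [("x", some 5), ("label", some 1)], []]

def Spec_count_labels_records (records : List (List (String × Option Int))) (out : List (String × Int)) : Prop := out = count_labels_records_alt records
instance (records : List (List (String × Option Int))) (out : List (String × Int)) : Decidable (Spec_count_labels_records records out) := by unfold Spec_count_labels_records; infer_instance

-- ===== CLAIM (what is proved, stated in full; the proofs are below) =====
def Claim_equal_count_labels_records : Prop := ∀ (records : List (List (String × Option Int))), Dom_count_labels_records records → Pre_count_labels_records records → Spec_count_labels_records records (count_labels_records records)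

-- ===== LEMMAS AND PROOFS =====

-- under Pre_, the comprehension yields exactly the per-row labels
theorem normalizedLabels_eq (records : List (List (String × Option Int)))
    (h : Pre_count_labels_records records) :
    normalizedLabels records = some (records.map (fun row => rowLabel row)) := by
  induction records with
  | nil => rfl
  | cons row rest ih =>
    have hrow := h row (List.mem_cons_self ..)
    have hrest : Pre_count_labels_records rest := fun r hr => h r (List.mem_cons_of_mem _ hr)
    rcases hrow with h0 | h0 | h0 <;>
      simp [normalizedLabels, ih hrest, normalizeLabel, h0]

-- A's loop computes length and per-value counts of the label list, shifted by the accumulators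
theorem countLoop_eq (records : List (List (String × Option Int)))
    (h : Pre_count_labels_records records) :
    ∀ total c0 c1 cn, countLoop records total c0 c1 cn =
      some (total + (records.map (fun row => rowLabel row)).length,
            c0 + ((records.map (fun row => rowLabel row)).count (some 0) : Int),
            c1 + ((records.map (fun row => rowLabel row)).count (some 1) : Int),
            cn + ((records.map (fun row => rowLabel row)).count (none : Option Int) : Int)) := by
  induction records with
  | nil => intro t c0 c1 cn; simp [countLoop]
  | cons row rest ih =>
    intro t c0 c1 cn
    have hrow := h row (List.mem_cons_self ..)
    have hrest : Pre_count_labels_records rest := fun r hr => h r (List.mem_cons_of_mem _ hr)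
    rcases hrow with h0 | h0 | h0 <;>
      simp [countLoop, normalizeLabel, h0, ih hrest] <;> ring_nf <;> exact ⟨trivial, trivial⟩

-- with only None/0/1 present, the null count is the arithmetic remainder
theorem count_none_eq (ls : List (Option Int))
    (h : ∀ l ∈ ls, l = none ∨ l = some 0 ∨ l = some 1) :
    (ls.count (none : Option Int) : Int)
      = (ls.length : Int) - (ls.count (some 0) : Int) - (ls.count (some 1) : Int) := by
  induction ls with
  | nil => simp
  | cons a t ih =>
    have ha := h a (List.mem_cons_self ..)
    have ht := ih (fun l hl => h l (List.mem_cons_of_mem _ hl))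
    rcases ha with h0 | h0 | h0 <;> subst h0 <;>
      simp only [List.count_cons, List.length_cons] <;> simp <;> omega

-- ===== VERDICT (by name: the statement is the Claim_ definition above) =====
theorem count_labels_records_spec : Claim_equal_count_labels_records := by
  intro records _ hpre
  unfold Spec_count_labels_records count_labels_records count_labels_records_alt
  rw [normalizedLabels_eq records hpre, countLoop_eq records hpre]
  have hmem : ∀ l ∈ records.map (fun row => rowLabel row), l = none ∨ l = some 0 ∨ l = some 1 := by
    intro l hl
    rcases List.mem_map.1 hl with ⟨r, hr, rfl⟩
    exact hpre r hr
  simp [PySem.List.count, count_none_eq _ hmem]
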